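-- pv_equiv track=rewrite | github.com/TinkerTools/poltype2 | PoltypeModules/databaseparser.py | CountRingsInSMARTS
-- ===== SOURCE A (Python) =====
-- def CountRingsInSMARTS(poltype,parametersmarts):
--     closedbrack=True
--     numbers=[]
--     for e in parametersmarts:
--         if e=='[':
--             closedbrack=False
--         elif e==']':
--             closedbrack=True
--         elif e.isdigit():
--             if closedbrack==True:
--                 if e not in numbers:
--                     numbers.append(e)
--     rings=len(numbers)
--     return rings
-- ===== SOURCE B (Python) =====
-- def CountRingsInSMARTS(poltype, parametersmarts):
--     outside = []
--     rest = parametersmarts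
--     while '[' in rest:
--         before, _, rest = rest.partition('[')
--         outside.append(before)
--         _, _, rest = rest.partition(']')
--     outside.append(rest)
--     return len({c for c in ''.join(outside) if c.isdigit()})
-- ===== Notes on version B (the rewrite author's own statement) =====
-- stated objective: simpler
-- what changed: Replaces the char-by-char state machine with a closedbrack flag and incremental 'not in' list dedup by partition-based bracket stripping (cut at each '[' and the following ']') followed by one set comprehension over the remaining text.
import Mathlib
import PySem

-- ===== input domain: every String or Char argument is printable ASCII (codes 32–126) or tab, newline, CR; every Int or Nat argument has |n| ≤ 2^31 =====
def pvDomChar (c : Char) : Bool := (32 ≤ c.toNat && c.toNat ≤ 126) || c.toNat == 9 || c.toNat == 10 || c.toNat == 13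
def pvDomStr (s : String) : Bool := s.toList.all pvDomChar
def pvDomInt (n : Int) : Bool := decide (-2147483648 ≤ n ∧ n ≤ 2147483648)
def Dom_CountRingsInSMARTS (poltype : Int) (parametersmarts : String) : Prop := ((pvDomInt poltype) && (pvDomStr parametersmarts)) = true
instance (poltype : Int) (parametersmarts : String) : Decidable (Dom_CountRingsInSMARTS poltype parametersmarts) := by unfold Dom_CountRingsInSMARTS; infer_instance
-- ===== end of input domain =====

-- B strips the bracket regions with str.partition and counts distinct digits in one set
-- comprehension, instead of A's per-character state machine with an incremental 'not in' dedup.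

-- ===== PORT A =====
-- the for-loop of A over (closedbrack, numbers); branches in source order
def pvALoop : List Char → Bool → List Char → List Char
  | [], _, numbers => numbers
  | e :: r, closedbrack, numbers =>
    if e = '[' then pvALoop r false numbers
    else if e = ']' then pvALoop r true numbers
    else if PySem.Chars.isdigit e then
      if closedbrack = true then
        if !(numbers.contains e) then pvALoop r closedbrack (numbers ++ [e])
        else pvALoop r closedbrack numbers
      else pvALoop r closedbrack numbers
    else pvALoop r closedbrack numbers

def CountRingsInSMARTS (poltype : Int) (parametersmarts : String) : Int :=
  ((pvALoop parametersmarts.toList true []).length : Int)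

-- ===== PORT B =====
-- hand port of Python str.partition(sep) for a one-char separator (PySem has no partition):
-- exact — returns (head, sep-or-empty, tail), splitting at the FIRST occurrence of sep.
def pvPartition (sep : Char) : List Char → List Char × List Char × List Char
  | [] => ([], [], [])
  | c :: rest =>
    if c = sep then ([], [sep], rest)
    else
      let p := pvPartition sep rest
      (c :: p.1, p.2.1, p.2.2)

theorem pvPartition_third_length_le (sep : Char) (l : List Char) :
    (pvPartition sep l).2.2.length ≤ l.length := by
  induction l with
  | nil => simp [pvPartition]
  | cons c rest ih =>
    simp only [pvPartition]
    split <;> simp <;> omega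

theorem pvPartition_mem (sep : Char) (l : List Char) (h : sep ∈ l) :
    l = (pvPartition sep l).1 ++ sep :: (pvPartition sep l).2.2 ∧
      sep ∉ (pvPartition sep l).1 := by
  induction l with
  | nil => simp at h
  | cons c rest ih =>
    by_cases hc : c = sep
    · subst hc; simp [pvPartition]
    · have hm : sep ∈ rest := by
        rcases List.mem_cons.mp h with h' | h'
        · exact absurd h'.symm hc
        · exact h'
      obtain ⟨h1, h2⟩ := ih hm
      refine ⟨?_, ?_⟩
      · simp only [pvPartition, if_neg hc]
        exact congrArg (c :: ·) h1
      · simp only [pvPartition, if_neg hc, List.mem_cons, not_or]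
        exact ⟨Ne.symm hc, h2⟩


-- the while-loop of B: collects the pieces Source B appends to `outside`
def pvBGo (rest : List Char) : List (List Char) :=
  if h : rest.contains '[' then
    let p := pvPartition '[' rest
    let q := pvPartition ']' p.2.2
    p.1 :: pvBGo q.2.2
  else [rest]
termination_by rest.length
decreasing_by
  have hmem : '[' ∈ rest := by simpa using h
  have h1 : (pvPartition ']' (pvPartition '[' rest).2.2).2.2.length
      ≤ (pvPartition '[' rest).2.2.length := pvPartition_third_length_le _ _
  have h2 := (pvPartition_mem '[' rest hmem).1
  have h3 := congrArg List.length h2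
  simp only [List.length_append, List.length_cons] at h3
  omega

def CountRingsInSMARTS_alt (poltype : Int) (parametersmarts : String) : Int :=
  PySem.Set.len
    (PySem.Set.ofList (((pvBGo parametersmarts.toList).flatten).filter PySem.Chars.isdigit))

-- ===== PRECONDITION & SPEC =====
def Spec_CountRingsInSMARTS (poltype : Int) (parametersmarts : String) (out : Int) : Prop := out = CountRingsInSMARTS_alt poltype parametersmarts
instance (poltype : Int) (parametersmarts : String) (out : Int) : Decidable (Spec_CountRingsInSMARTS poltype parametersmarts out) := by unfold Spec_CountRingsInSMARTS; infer_instance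

-- ===== CLAIM (what is proved, stated in full; the proofs are below) =====
def Claim_equal_CountRingsInSMARTS : Prop := ∀ (poltype : Int) (parametersmarts : String), Dom_CountRingsInSMARTS poltype parametersmarts → Spec_CountRingsInSMARTS poltype parametersmarts (CountRingsInSMARTS poltype parametersmarts)

-- ===== LEMMAS AND PROOFS =====

theorem pvPartition_not_mem (sep : Char) (l : List Char) (h : sep ∉ l) :
    pvPartition sep l = (l, [], []) := by
  induction l with
  | nil => rfl
  | cons c rest ih =>
    simp only [List.mem_cons, not_or] at h
    simp [pvPartition, if_neg (Ne.symm h.1 : c ≠ sep), ih h.2]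




-- the digits A's machine sees in closed-bracket state, in order, with multiplicity
def pvDigits : List Char → Bool → List Char
  | [], _ => []
  | e :: r, cb =>
    if e = '[' then pvDigits r false
    else if e = ']' then pvDigits r true
    else if cb && PySem.Chars.isdigit e then e :: pvDigits r cb
    else pvDigits r cb

theorem pvALoop_eq_foldl (l : List Char) (cb : Bool) (nums : List Char) :
    pvALoop l cb nums = (pvDigits l cb).foldl PySem.Set.add nums := by
  induction l generalizing cb nums with
  | nil => simp [pvALoop, pvDigits]
  | cons e r ih =>
    by_cases h1 : e = '['
    · subst h1; simp [pvALoop, pvDigits, ih]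
    · by_cases h2 : e = ']'
      · subst h2; simp [pvALoop, pvDigits, h1, ih]
      · by_cases h3 : PySem.Chars.isdigit e
        · cases cb with
          | false => simp [pvALoop, pvDigits, h1, h2, h3, ih]
          | true =>
            simp [pvALoop, pvDigits, h1, h2, h3, ih, PySem.Set.add, PySem.Set.contains]
            split_ifs <;> rfl
        · simp only [Bool.not_eq_true] at h3
          simp [pvALoop, pvDigits, h1, h2, h3, ih]

theorem pvDigits_true_no_lb (l : List Char) (h : '[' ∉ l) :
    pvDigits l true = l.filter PySem.Chars.isdigit := by
  induction l with
  | nil => simp [pvDigits]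
  | cons e r ih =>
    simp only [List.mem_cons, not_or] at h
    have h1 : e ≠ '[' := fun hh => h.1 hh.symm
    by_cases h2 : e = ']'
    · subst h2
      simp [pvDigits, ih h.2, List.filter_cons,
        show PySem.Chars.isdigit ']' = false from by decide]
    · by_cases h3 : PySem.Chars.isdigit e <;>
        simp [pvDigits, h1, h2, h3, ih h.2, List.filter_cons]

theorem pvDigits_true_append_no_lb (a l : List Char) (h : '[' ∉ a) :
    pvDigits (a ++ l) true = a.filter PySem.Chars.isdigit ++ pvDigits l true := by
  induction a with
  | nil => simp
  | cons e r ih =>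
    simp only [List.mem_cons, not_or] at h
    have h1 : e ≠ '[' := fun hh => h.1 hh.symm
    by_cases h2 : e = ']'
    · subst h2
      simp [pvDigits, ih h.2, List.filter_cons,
        show PySem.Chars.isdigit ']' = false from by decide]
    · by_cases h3 : PySem.Chars.isdigit e <;>
        simp [pvDigits, h1, h2, h3, ih h.2, List.filter_cons]

theorem pvDigits_false_no_rb (l : List Char) (h : ']' ∉ l) :
    pvDigits l false = [] := by
  induction l with
  | nil => simp [pvDigits]
  | cons e r ih =>
    simp only [List.mem_cons, not_or] at h
    have h2 : e ≠ ']' := fun hh => h.1 hh.symm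
    by_cases h1 : e = '['
    · subst h1; simpa [pvDigits] using ih h.2
    · simp [pvDigits, h1, h2, ih h.2]

theorem pvDigits_false_append (a t : List Char) (h : ']' ∉ a) :
    pvDigits (a ++ ']' :: t) false = pvDigits t true := by
  induction a with
  | nil => simp [pvDigits]
  | cons e r ih =>
    simp only [List.mem_cons, not_or] at h
    have h2 : e ≠ ']' := fun hh => h.1 hh.symm
    by_cases h1 : e = '['
    · subst h1; simpa [pvDigits] using ih h.2
    · simp [pvDigits, h1, h2, ih h.2]

theorem pvBGo_digits (rest : List Char) :
    ((pvBGo rest).flatten).filter PySem.Chars.isdigit = pvDigits rest true := by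
  induction hn : rest.length using Nat.strong_induction_on generalizing rest with
  | _ n ih =>
  subst hn
  rw [pvBGo]
  by_cases h : rest.contains '['
  · simp only [dif_pos h]
    have hmem : '[' ∈ rest := by simpa using h
    obtain ⟨hsplit, hnot⟩ := pvPartition_mem '[' rest hmem
    set a := (pvPartition '[' rest).1 with ha
    set b := (pvPartition '[' rest).2.2 with hb
    have hblen : b.length < rest.length := by
      rw [hsplit]; simp; omega
    by_cases hrb : ']' ∈ b
    · obtain ⟨hsplit2, hnot2⟩ := pvPartition_mem ']' b hrb
      set t := (pvPartition ']' b).2.2 with ht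
      have htlen : t.length < rest.length := by
        have : t.length < b.length := by rw [hsplit2]; simp; omega
        omega
      have hih := ih t.length htlen t rfl
      simp only [List.flatten_cons, List.filter_append, hih]
      rw [hsplit, pvDigits_true_append_no_lb a _ hnot]
      rw [show pvDigits ('[' :: b) true = pvDigits b false from by simp [pvDigits]]
      rw [hsplit2, pvDigits_false_append _ _ hnot2]
    · rw [pvPartition_not_mem ']' b hrb]
      simp only [List.flatten_cons]
      have hih := ih 0 (by rw [hsplit]; simp) [] rfl
      simp only [List.filter_append, hih]
      rw [hsplit, pvDigits_true_append_no_lb a _ hnot]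
      rw [show pvDigits ('[' :: b) true = pvDigits b false from by simp [pvDigits]]
      rw [pvDigits_false_no_rb b hrb]
      simp [pvDigits]
  · simp only [dif_neg h, List.flatten_cons, List.flatten_nil, List.append_nil]
    exact (pvDigits_true_no_lb rest (by simpa using h)).symm

-- ===== VERDICT (by name: the statement is the Claim_ definition above) =====
theorem CountRingsInSMARTS_spec : Claim_equal_CountRingsInSMARTS := by
  intro poltype s _
  show CountRingsInSMARTS poltype s = CountRingsInSMARTS_alt poltype s
  unfold CountRingsInSMARTS CountRingsInSMARTS_alt
  rw [pvALoop_eq_foldl, pvBGo_digits]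
  rfl
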